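-- pv_equiv track=rewrite | github.com/Areeb-acs/Onasi-Helper-Bot | backend/claimscrubber.py | analyze_fhir_message_and_get_explanation
-- ===== SOURCE A (Python) =====
-- def analyze_fhir_message_and_get_explanation(fhir_content):
--     """
--     Analyzes the FHIR message and retrieves explanations for error codes.
--
--     Args:
--         fhir_content (str): The FHIR message as a string.
--         chat_helper: The chatbot function that explains the error codes.
--
--     Returns:
--         str: Chatbot's explanation for the analysis result.
--     """
--
--
--
--
--     required_keys = ["careTeamSequence", "diagnosisSequence", "informationSequence"]
--     missing_keys = []
--
--     for key in required_keys:
--         if key not in fhir_content: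
--             missing_keys.append(key)
--
--     if missing_keys:
--         error_messages = []
--         for key in missing_keys:
--             if key == "careTeamSequence":
--                 error_messages.append(f"Missing {key}: IC-3898")
--             elif key == "diagnosisSequence":
--                 error_messages.append(f"Missing {key}: IC-3893")
--             elif key == "informationSequence":
--                 error_messages.append(f"Missing {key}: IC-3899")
--
--         analysis_result = "Error: " + ", ".join(error_messages)
--     else:
--         analysis_result = "Success: All required keys are present."
--
--
--     return analysis_result
-- ===== SOURCE B (Python) =====
-- # Precompute all 8 possible results once; at call time just compute a 3-bit
-- # "missing" mask and index the table -- no list building or joining per call.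
--
-- def _build_table():
--     keys_codes = [("careTeamSequence", "IC-3898"),
--                   ("diagnosisSequence", "IC-3893"),
--                   ("informationSequence", "IC-3899")]
--     table = []
--     for mask in range(8):
--         msgs = [f"Missing {k}: {c}"
--                 for bit, (k, c) in zip((4, 2, 1), keys_codes) if mask & bit]
--         table.append("Error: " + ", ".join(msgs) if msgs
--                      else "Success: All required keys are present.")
--     return table
--
-- _TABLE = _build_table()
--
-- def analyze_fhir_message_and_get_explanation(fhir_content):
--     idx = (("careTeamSequence" not in fhir_content) * 4
--            + ("diagnosisSequence" not in fhir_content) * 2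
--            + ("informationSequence" not in fhir_content))
--     return _TABLE[idx]
-- ===== Notes on version B (the rewrite author's own statement) =====
-- stated objective: alternative
-- what changed: Replaces A's per-call loops (collect missing keys, then an if/elif chain building and joining messages) with a precomputed 8-entry table of all possible answers indexed by a 3-bit missing-key mask; each call does three membership tests, arithmetic and one table lookup.
import Mathlib
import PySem

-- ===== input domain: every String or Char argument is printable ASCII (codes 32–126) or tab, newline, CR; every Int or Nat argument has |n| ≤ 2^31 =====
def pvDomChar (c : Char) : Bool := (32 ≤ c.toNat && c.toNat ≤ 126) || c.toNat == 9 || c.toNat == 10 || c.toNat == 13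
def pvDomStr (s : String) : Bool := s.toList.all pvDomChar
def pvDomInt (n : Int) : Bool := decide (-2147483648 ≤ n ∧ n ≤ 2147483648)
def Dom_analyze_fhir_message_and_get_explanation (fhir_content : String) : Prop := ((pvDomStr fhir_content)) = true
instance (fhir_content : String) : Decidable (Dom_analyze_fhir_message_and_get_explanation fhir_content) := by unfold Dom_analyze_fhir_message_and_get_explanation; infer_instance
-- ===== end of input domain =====

-- B precomputes the 8 possible answers once and indexes that table by a 3-bit
-- missing-key mask, instead of A's per-call loops and if/elif message building (objective: alternative).

-- ===== PORT A =====
def analyze_fhir_message_and_get_explanation (fhir_content : String) : String :=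
  let required_keys : List String := ["careTeamSequence", "diagnosisSequence", "informationSequence"]
  let missing_keys : List String :=
    required_keys.foldl (fun acc key =>
      if !(PySem.Str.isIn key fhir_content) then acc ++ [key] else acc) []
  if missing_keys ≠ [] then
    let error_messages : List String :=
      missing_keys.foldl (fun acc key =>
        if key == "careTeamSequence" then acc ++ ["Missing " ++ key ++ ": IC-3898"]
        else if key == "diagnosisSequence" then acc ++ ["Missing " ++ key ++ ": IC-3893"]
        else if key == "informationSequence" then acc ++ ["Missing " ++ key ++ ": IC-3899"]
        else acc) []
    "Error: " ++ PySem.Str.join ", " error_messages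
  else
    "Success: All required keys are present."

-- ===== PORT B =====
-- transliteration of Source B's _build_table (module-level precomputation)
def pvBuildTable : List String :=
  let keys_codes : List (String × String) :=
    [("careTeamSequence", "IC-3898"), ("diagnosisSequence", "IC-3893"), ("informationSequence", "IC-3899")]
  (PySem.List.pyRange 0 8 1).foldl (fun table mask =>
    let msgs : List String :=
      (([4, 2, 1] : List Int).zip keys_codes).foldl (fun acc p =>
        if mask.toNat.land p.1.toNat != 0 then acc ++ ["Missing " ++ p.2.1 ++ ": " ++ p.2.2] else acc) []
    table ++ [if msgs ≠ [] then "Error: " ++ PySem.Str.join ", " msgs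
              else "Success: All required keys are present."]) []

def analyze_fhir_message_and_get_explanation_alt (fhir_content : String) : String :=
  let idx : Int :=
    (if PySem.Str.isIn "careTeamSequence" fhir_content then 0 else 1) * 4
    + (if PySem.Str.isIn "diagnosisSequence" fhir_content then 0 else 1) * 2
    + (if PySem.Str.isIn "informationSequence" fhir_content then 0 else 1)
  -- idx is always 0..7, so the getD default is never used (Python's _TABLE[idx] never raises)
  (PySem.List.pyGet? pvBuildTable idx).getD ""

-- ===== PRECONDITION & SPEC =====
def Spec_analyze_fhir_message_and_get_explanation (fhir_content : String) (out : String) : Prop := out = analyze_fhir_message_and_get_explanation_alt fhir_content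
instance (fhir_content : String) (out : String) : Decidable (Spec_analyze_fhir_message_and_get_explanation fhir_content out) := by unfold Spec_analyze_fhir_message_and_get_explanation; infer_instance

-- ===== CLAIM =====
def Claim_equal_analyze_fhir_message_and_get_explanation : Prop := ∀ (fhir_content : String), Dom_analyze_fhir_message_and_get_explanation fhir_content → Spec_analyze_fhir_message_and_get_explanation fhir_content (analyze_fhir_message_and_get_explanation fhir_content)

-- ===== LEMMAS AND PROOFS =====

-- ===== VERDICT =====
theorem analyze_fhir_message_and_get_explanation_spec : Claim_equal_analyze_fhir_message_and_get_explanation := by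
  intro fhir_content _
  unfold Spec_analyze_fhir_message_and_get_explanation
  unfold analyze_fhir_message_and_get_explanation analyze_fhir_message_and_get_explanation_alt
  cases h1 : PySem.Str.isIn "careTeamSequence" fhir_content <;>
  cases h2 : PySem.Str.isIn "diagnosisSequence" fhir_content <;>
  cases h3 : PySem.Str.isIn "informationSequence" fhir_content <;>
    (simp only [List.foldl_cons, List.foldl_nil, h1, h2, h3]; rfl)
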